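-- pv_equiv track=rewrite | github.com/deok2kim/algorithm | 1111.py | solution
-- ===== SOURCE A (Python) =====
-- def solution(S):
--     answer = 0
--     a_cnt = 0
--     S += 'T'
--     for i in range(len(S)):
--         c_word = S[i]
--         if a_cnt == 3:
--             return -1
--
--         if c_word == 'a':
--             a_cnt += 1
--         else:
--             answer += 2-a_cnt
--             a_cnt = 0
--
--     return answer
-- ===== SOURCE B (Python) =====
-- def solution(S):
--     if 'aaa' in S:
--         return -1
--     return 2 * len(S) - 3 * S.count('a') + 2
-- ===== Notes on version B (the rewrite author's own statement) =====
-- stated objective: simpler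
-- what changed: Replaces the per-character scan with its run counter and early return by a closed form: -1 if 'aaa' occurs in S, else 2*len(S) - 3*S.count('a') + 2.
import Mathlib
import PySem

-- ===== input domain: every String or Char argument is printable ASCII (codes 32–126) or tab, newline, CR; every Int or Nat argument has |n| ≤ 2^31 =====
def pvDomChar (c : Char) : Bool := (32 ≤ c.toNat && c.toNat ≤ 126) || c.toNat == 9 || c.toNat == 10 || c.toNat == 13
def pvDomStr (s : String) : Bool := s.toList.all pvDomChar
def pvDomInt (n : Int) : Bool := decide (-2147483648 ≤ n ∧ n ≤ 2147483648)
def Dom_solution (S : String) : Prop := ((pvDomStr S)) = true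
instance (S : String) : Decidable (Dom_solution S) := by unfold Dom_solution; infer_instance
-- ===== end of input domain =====

-- B replaces A's per-character scan and run counter with a closed form:
-- -1 if 'aaa' occurs in S, otherwise 2*len(S) - 3*S.count('a') + 2.

-- ===== PORT A =====
-- the for-loop over S + 'T' with state (answer, a_cnt) and an early 'return -1'
def solutionGo : List Char → Int → Int → Int
  | [], answer, _ => answer
  | c :: rest, answer, aCnt =>
    if aCnt == 3 then -1
    else if c == 'a' then solutionGo rest answer (aCnt + 1)
    else solutionGo rest (answer + (2 - aCnt)) 0

def solution (S : String) : Int := solutionGo (S.toList ++ ['T']) 0 0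

-- ===== PORT B =====
def solution_alt (S : String) : Int :=
  if PySem.Str.isIn "aaa" S then -1
  else 2 * (PySem.Str.len S : Int) - 3 * (PySem.Str.count S "a" : Int) + 2

-- ===== PRECONDITION & SPEC =====
def Spec_solution (S : String) (out : Int) : Prop := out = solution_alt S
instance (S : String) (out : Int) : Decidable (Spec_solution S out) := by unfold Spec_solution; infer_instance

-- ===== CLAIM (what is proved, stated in full; the proofs are below) =====
def Claim_equal_solution : Prop := ∀ (S : String), Dom_solution S → Spec_solution S (solution S)

-- ===== LEMMAS AND PROOFS =====

-- whether the scan starting with run counter `cnt` will hit a_cnt == 3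
def pvBad : Int → List Char → Bool
  | cnt, [] => cnt == 3
  | cnt, c :: rest => cnt == 3 || (if c == 'a' then pvBad (cnt + 1) rest else pvBad 0 rest)

theorem pvGo_eq (l : List Char) : ∀ (ans cnt : Int),
    solutionGo (l ++ ['T']) ans cnt =
      if pvBad cnt l then -1
      else ans + 2 * (l.countP (fun c => !(c == 'a')) : Int) + 2 - cnt - (l.count 'a' : Int) := by
  induction l with
  | nil =>
    intro ans cnt
    simp only [List.nil_append, solutionGo, pvBad, List.countP_nil, List.count_nil]
    by_cases h : cnt = 3 <;> simp [h] <;> ring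
  | cons c t ih =>
    intro ans cnt
    simp only [List.cons_append, solutionGo, pvBad]
    by_cases h3 : cnt = 3
    · simp [h3]
    · by_cases ha : c = 'a'
      · simp only [ha, h3, if_true, if_false, beq_self_eq_true, beq_iff_eq, Bool.false_or,
          List.countP_cons, List.count_cons, ih]
        by_cases hb : pvBad (cnt + 1) t <;> simp [hb, h3] <;> push_cast <;> ring
      · have hne : (c == 'a') = false := by simp [ha]
        simp only [hne, h3, if_false, beq_iff_eq, Bool.false_or, List.countP_cons,
          List.count_cons, ih]
        by_cases hb : pvBad 0 t <;> simp [hb, hne, h3] <;> push_cast <;> ring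

theorem pvBad_three : ∀ (t : List Char), pvBad 3 t = true
  | [] => rfl
  | _ :: _ => by simp [pvBad]

theorem pvBad_iff (l : List Char) :
    (pvBad 0 l = true ↔ ['a','a','a'] <:+: l) ∧
    (pvBad 1 l = true ↔ ['a','a'] <+: l ∨ ['a','a','a'] <:+: l) ∧
    (pvBad 2 l = true ↔ ['a'] <+: l ∨ ['a','a','a'] <:+: l) := by
  induction l with
  | nil => simp [pvBad]
  | cons c t ih =>
    obtain ⟨i0, i1, i2⟩ := ih
    by_cases ha : c = 'a'
    · subst ha
      have h12 : ['a','a'] <+: t → ['a'] <+: t :=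
        fun h => (show ['a'] <+: ['a','a'] by decide).trans h
      refine ⟨?_, ?_, ?_⟩
      · simp [pvBad, i1, List.infix_cons_iff, List.cons_prefix_cons]; try tauto
      · simp [pvBad, i2, List.infix_cons_iff, List.cons_prefix_cons]; try tauto
      · simp [pvBad, pvBad_three, List.infix_cons_iff, List.cons_prefix_cons]
    · have hne : (c == 'a') = false := by simp [ha]
      have hinf : (['a','a','a'] <:+: c :: t) ↔ ['a','a','a'] <:+: t := by
        rw [List.infix_cons_iff]
        constructor
        · rintro (h | h)
          · rw [List.cons_prefix_cons] at h; exact absurd h.1.symm ha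
          · exact h
        · exact Or.inr
      refine ⟨?_, ?_, ?_⟩
      · simp [pvBad, hne, i0, hinf]
      · have hac : ('a' = c) ↔ False := ⟨fun h => ha h.symm, False.elim⟩
        simp [pvBad, hne, i0, hinf, List.cons_prefix_cons, hac]
      · have hac : ('a' = c) ↔ False := ⟨fun h => ha h.symm, False.elim⟩
        simp [pvBad, hne, i0, hinf, List.cons_prefix_cons, hac]

theorem pvCountGo (fuel : Nat) : ∀ (l : List Char) (acc : Nat), l.length ≤ fuel →
    PySem.Chars.count.go ['a'] fuel l acc = acc + l.count 'a' := by
  induction fuel with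
  | zero =>
    intro l acc h
    have hl : l = [] := List.length_eq_zero_iff.mp (Nat.le_zero.mp h)
    subst hl
    rw [PySem.Chars.count.go] <;> simp
  | succ f ih =>
    intro l acc h
    cases l with
    | nil => rw [PySem.Chars.count.go] <;> simp
    | cons c t =>
      rw [PySem.Chars.count.go]
      simp only [List.isPrefixOf, List.length_cons, List.drop_succ_cons, List.length_nil,
        List.drop_zero, Bool.and_true]
      by_cases hc : ('a' == c) = true
      · simp only [hc, if_true, List.count_cons]
        rw [ih t (acc + 1) (by simpa using h)]
        have : (c == 'a') = true := beq_iff_eq.mpr (beq_iff_eq.mp hc).symm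
        simp [this]; omega
      · simp only [hc, if_false, List.count_cons]
        rw [ih t acc (by simpa using h)]
        have : (c == 'a') = false := by simp at hc ⊢; exact fun e => hc e.symm
        simp [this]

theorem pvCount_single (l : List Char) : PySem.Chars.count l ['a'] = l.count 'a' := by
  rw [PySem.Chars.count]
  simp only [List.isEmpty_cons, if_false]
  simpa using pvCountGo l.length l 0 le_rfl

theorem pvCountP_not (l : List Char) :
    l.countP (fun c => !(c == 'a')) + l.count 'a' = l.length := by
  induction l with
  | nil => simp
  | cons c t ih =>
    simp only [List.countP_cons, List.count_cons, List.length_cons]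
    by_cases hc : (c == 'a') = true <;> simp [hc] <;> omega

-- ===== VERDICT (by name: the statement is the Claim_ definition above) =====
theorem solution_spec : Claim_equal_solution := by
  intro S _
  unfold Spec_solution solution solution_alt
  rw [pvGo_eq]
  have hbad : pvBad 0 S.toList = PySem.Str.isIn "aaa" S := by
    rw [Bool.eq_iff_iff, (pvBad_iff S.toList).1, PySem.Str.isIn_iff_infix,
      show "aaa".toList = ['a','a','a'] from by decide]
  rw [hbad]
  by_cases h : PySem.Str.isIn "aaa" S = true
  · simp only [h, if_true]
  · simp only [h, Bool.false_eq_true, if_false]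
    have hcnt : PySem.Str.count S "a" = S.toList.count 'a' := by
      rw [PySem.Str.count_eq, show "a".toList = ['a'] from by decide, pvCount_single]
    have hlen : PySem.Str.len S = S.toList.length := by
      rw [PySem.Str.len_eq]
    rw [hcnt, hlen]
    have hP : ((S.toList.countP (fun c => !(c == 'a'))) : Int)
        + (S.toList.count 'a' : Int) = (S.toList.length : Int) := by
      exact_mod_cast pvCountP_not S.toList
    omega
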